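-- pv_equiv track=rewrite | github.com/limicala/DSA | Dynamic/chorus.py | book_recursion
-- ===== SOURCE A (Python) =====
-- def book_recursion(s, n, k, d):
--
--     def solve(s, n, k, d, m1, m2):
--         if min_matrix[n][k] > 0:
--             return min_matrix[n][k], max_matrix[n][k]
--         left = k - 1
--         if len(s) != n:
--             left = max(k - 1, n - d)
--         q = -1
--         curr_min = 999999999
--         curr_max = -1
--         for i in range(left, n):
--             pre_min, pre_max = solve(s, i, k - 1, d, m1, m2)
--             curr_min = min(curr_min, pre_min * s[i], pre_max * s[i])
--             curr_max = max(curr_max, pre_min * s[i], pre_max * s[i])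
--         min_matrix[n][k] = curr_min
--         max_matrix[n][k] = curr_max
--         return curr_min, curr_max
--
--     min_matrix = [[0 for i in range(k + 1)] for i in range(n + 1)]
--     max_matrix = [[0 for i in range(k + 1)] for i in range(n + 1)]
--
--     for i in range(n + 1):
--         min_matrix[i][0] = 1
--         max_matrix[i][0] = 1
--
--     return solve(s, n, k, d, min_matrix, max_matrix)
-- ===== SOURCE B (Python) =====
-- def book_recursion(s, n, k, d):
--     # Bottom-up layered DP (same (min, max) pair as the memoized recursion).
--     # The final window is limited by d only when n understates len(s), as in the original.
--     BIG = 999999999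
--     if k == 0:
--         return (1, 1)
--     left = k - 1 if len(s) == n else max(k - 1, n - d)
--     if n <= left:
--         return (BIG, -1)
--     prev = [(1, 1)] * n
--     for j in range(1, k):
--         lo = [min(pm * x, pM * x) for (pm, pM), x in zip(prev, s)]
--         hi = [max(pm * x, pM * x) for (pm, pM), x in zip(prev, s)]
--         prev = [(min([BIG] + lo[max(j - 1, m - d):m]),
--                  max([-1] + hi[max(j - 1, m - d):m])) for m in range(n)]
--     lo = [min(pm * x, pM * x) for (pm, pM), x in zip(prev, s)]
--     hi = [max(pm * x, pM * x) for (pm, pM), x in zip(prev, s)]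
--     return (min([BIG] + lo[left:n]), max([-1] + hi[left:n]))
-- ===== Notes on version B (the rewrite author's own statement) =====
-- stated objective: faster
-- what changed: Replaces the memoized top-down recursion over two mutable matrices (whose memo test `min_matrix[n][k] > 0` misses whenever a stored minimum is <= 0, re-running whole subtrees) by a bottom-up layered tabulation: one row per partition count, each cell a min/max over a slice of the previous row, so every cell is computed exactly once. Intended as faster; measured ~2780x at the largest size where both finish (n=16384), though on huge inputs both eventually stall on astronomically large big-integer products.
import Mathlib
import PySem

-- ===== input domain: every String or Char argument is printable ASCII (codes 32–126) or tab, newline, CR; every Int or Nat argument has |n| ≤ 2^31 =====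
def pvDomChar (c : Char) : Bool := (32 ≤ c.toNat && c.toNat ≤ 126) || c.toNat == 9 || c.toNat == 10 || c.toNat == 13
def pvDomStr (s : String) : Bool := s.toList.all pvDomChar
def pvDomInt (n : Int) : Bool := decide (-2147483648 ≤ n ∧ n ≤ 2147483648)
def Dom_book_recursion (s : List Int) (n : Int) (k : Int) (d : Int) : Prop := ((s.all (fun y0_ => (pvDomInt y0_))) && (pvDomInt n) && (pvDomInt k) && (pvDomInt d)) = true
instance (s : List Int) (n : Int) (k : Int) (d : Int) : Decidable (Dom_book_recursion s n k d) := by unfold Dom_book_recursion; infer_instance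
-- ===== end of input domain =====

-- B replaces A's memoized top-down recursion (whose memo test `min > 0` misses whenever a stored
-- minimum is ≤ 0) by a bottom-up layered tabulation; equivalence is about the return value.

-- ===== PORT A =====
-- Python: m[i][j] = v  (row i, column j; indices are in range under Pre_)
def pvSet2 (m : List (List Int)) (i j : Nat) (v : Int) : List (List Int) :=
  m.set i ((m.getD i []).set j v)

-- Python: inner `solve`, the two memo matrices threaded through; fuel = k.toNat
-- (each recursive call decreases k by 1, and k = 0 always hits the memo row initialised to 1).
def solveA (s : List Int) (d : Int) : Nat → Int → Int → List (List Int) → List (List Int) →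
    (Int × Int) × List (List Int) × List (List Int)
  | fuel, n, k, mm, mM =>
    let a := (mm.getD n.toNat []).getD k.toNat 0
    if 0 < a then ((a, (mM.getD n.toNat []).getD k.toNat 0), mm, mM)
    else
      match fuel with
      | 0 => ((999999999, -1), mm, mM)  -- unreachable when fuel = k.toNat (k = 0 hits the memo)
      | fuel' + 1 =>
        let left := if (s.length : Int) = n then k - 1 else max (k - 1) (n - d)
        let st := (PySem.List.pyRange left n 1).foldl
          (fun (st : (Int × Int) × List (List Int) × List (List Int)) i =>
            let r := solveA s d fuel' i (k - 1) st.2.1 st.2.2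
            let x := PySem.List.pyGetD s i 0
            ((min st.1.1 (min (r.1.1 * x) (r.1.2 * x)),
              max st.1.2 (max (r.1.1 * x) (r.1.2 * x))), r.2))
          ((999999999, -1), mm, mM)
        ((st.1.1, st.1.2),
          pvSet2 st.2.1 n.toNat k.toNat st.1.1, pvSet2 st.2.2 n.toNat k.toNat st.1.2)

-- the `min_matrix[i][0] = 1; max_matrix[i][0] = 1` initialisation loop body
def pvInitStep (st : List (List Int) × List (List Int)) (i : Int) :
    List (List Int) × List (List Int) :=
  (pvSet2 st.1 i.toNat 0 1, pvSet2 st.2 i.toNat 0 1)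

def book_recursion (s : List Int) (n : Int) (k : Int) (d : Int) : List Int :=
  let mm0 := List.replicate (n + 1).toNat (List.replicate (k + 1).toNat (0 : Int))
  let init := (PySem.List.pyRange 0 (n + 1) 1).foldl pvInitStep (mm0, mm0)
  let r := solveA s d k.toNat n k init.1 init.2
  [r.1.1, r.1.2]

-- ===== PORT B =====
-- lo[i] = min(pm*s[i], pM*s[i]) and hi[i] = max(pm*s[i], pM*s[i])  (the two zips in Source B)
def pvLo (prev : List (Int × Int)) (s : List Int) : List Int :=
  List.zipWith (fun p x => min (p.1 * x) (p.2 * x)) prev s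
def pvHi (prev : List (Int × Int)) (s : List Int) : List Int :=
  List.zipWith (fun p x => max (p.1 * x) (p.2 * x)) prev s

-- one layer of the bottom-up tabulation (the body of Source B's `for j in range(1, k)`)
def pvAltStep (s : List Int) (n : Int) (d : Int) (prev : List (Int × Int)) (j : Int) :
    List (Int × Int) :=
  let lo := pvLo prev s
  let hi := pvHi prev s
  (PySem.List.pyRange 0 n 1).map (fun m =>
    ((PySem.List.slice lo (some (max (j - 1) (m - d))) (some m)).foldl min 999999999,
     (PySem.List.slice hi (some (max (j - 1) (m - d))) (some m)).foldl max (-1)))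

def book_recursion_alt (s : List Int) (n : Int) (k : Int) (d : Int) : List Int :=
  if k = 0 then [1, 1]
  else
    let left := if (s.length : Int) = n then k - 1 else max (k - 1) (n - d)
    if n ≤ left then [999999999, -1]
    else
      let prev := (PySem.List.pyRange 1 k 1).foldl (pvAltStep s n d)
        (List.replicate n.toNat ((1 : Int), (1 : Int)))
      let lo := pvLo prev s
      let hi := pvHi prev s
      [(PySem.List.slice lo (some left) (some n)).foldl min 999999999,
       (PySem.List.slice hi (some left) (some n)).foldl max (-1)]

-- ===== PRECONDITION & SPEC =====
-- Pre_ is exactly the set of inputs on which A returns normally: it excludes n < 0 and k < 0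
-- (A raises IndexError on its memo matrices) and the calls with n > len(s) whose final window
-- is nonempty, on which A raises IndexError indexing s (n is documented as the length of s).
def Pre_book_recursion (s : List Int) (n : Int) (k : Int) (d : Int) : Prop :=
  0 ≤ n ∧ 0 ≤ k ∧ (n ≤ (s.length : Int) ∨ k = 0 ∨ n < k ∨ d ≤ 0)
instance (s : List Int) (n : Int) (k : Int) (d : Int) : Decidable (Pre_book_recursion s n k d) := by
  unfold Pre_book_recursion; infer_instance
def pvWitness_book_recursion : List Int × Int × Int × Int := ([2, -3, 4], 3, 2, 2)


def Spec_book_recursion (s : List Int) (n : Int) (k : Int) (d : Int) (out : List Int) : Prop := out = book_recursion_alt s n k d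
instance (s : List Int) (n : Int) (k : Int) (d : Int) (out : List Int) : Decidable (Spec_book_recursion s n k d out) := by unfold Spec_book_recursion; infer_instance

-- ===== CLAIM (what is proved, stated in full; the proofs are below) =====
def Claim_equal_book_recursion : Prop := ∀ (s : List Int) (n : Int) (k : Int) (d : Int), Dom_book_recursion s n k d → Pre_book_recursion s n k d → Spec_book_recursion s n k d (book_recursion s n k d)

-- ===== LEMMAS AND PROOFS =====

-- the common mathematical recurrence: pvG s d m j = (min, max) over all d-bounded
-- j-part splittings of positions [0, m)  (with A's sentinels 999999999 / -1)
def pvG (s : List Int) (d : Int) : Nat → Nat → Int × Int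
  | _, 0 => (1, 1)
  | m, j + 1 =>
    let l := (max (j : Int) ((m : Int) - d)).toNat
    (List.range' l (m - l)).foldl
      (fun c i =>
        (min c.1 (min ((pvG s d i j).1 * s.getD i 0) ((pvG s d i j).2 * s.getD i 0)),
         max c.2 (max ((pvG s d i j).1 * s.getD i 0) ((pvG s d i j).2 * s.getD i 0))))
      (999999999, -1)
termination_by _ j => j

def pvLoV (s : List Int) (d : Int) (j i : Nat) : Int :=
  min ((pvG s d i j).1 * s.getD i 0) ((pvG s d i j).2 * s.getD i 0)
def pvHiV (s : List Int) (d : Int) (j i : Nat) : Int :=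
  max ((pvG s d i j).1 * s.getD i 0) ((pvG s d i j).2 * s.getD i 0)

def pvEntry (mm : List (List Int)) (m j : Nat) : Int := (mm.getD m []).getD j 0

def pvInv (s : List Int) (d : Int) (R K : Nat) (mm mM : List (List Int)) : Prop :=
  mm.length = R + 1 ∧ mM.length = R + 1 ∧
  (∀ r ∈ mm, r.length = K + 1) ∧ (∀ r ∈ mM, r.length = K + 1) ∧
  ∀ m j, m ≤ R → j ≤ K →
    (j = 0 → pvEntry mm m j = 1 ∧ pvEntry mM m j = 1) ∧
    (0 < pvEntry mm m j →
      pvEntry mm m j = (pvG s d m j).1 ∧ pvEntry mM m j = (pvG s d m j).2)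

theorem foldl_pair_split {α : Type} (f g : α → Int) (L : List α) (x y : Int) :
    L.foldl (fun c i => (min c.1 (f i), max c.2 (g i))) (x, y)
      = (L.foldl (fun c i => min c (f i)) x, L.foldl (fun c i => max c (g i)) y) := by
  induction L generalizing x y with
  | nil => rfl
  | cons a L ih => simp [List.foldl_cons, ih]

theorem pvG_succ (s : List Int) (d : Int) (m j : Nat) :
    pvG s d m (j + 1) =
      ((List.range' ((max (j : Int) ((m : Int) - d)).toNat)
          (m - (max (j : Int) ((m : Int) - d)).toNat)).foldl
        (fun c i => min c (pvLoV s d j i)) 999999999,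
       (List.range' ((max (j : Int) ((m : Int) - d)).toNat)
          (m - (max (j : Int) ((m : Int) - d)).toNat)).foldl
        (fun c i => max c (pvHiV s d j i)) (-1)) := by
  rw [pvG]
  exact foldl_pair_split (pvLoV s d j) (pvHiV s d j) _ _ _

theorem pyRange_nonneg_eq_map (a b : Int) (ha : 0 ≤ a) :
    PySem.List.pyRange a b 1 = (List.range' a.toNat (b.toNat - a.toNat)).map (Nat.cast : Nat → Int) := by
  apply List.ext_getElem
  · simp [PySem.List.length_pyRange_one]
    omega
  · intro i h1 h2
    rw [PySem.List.getElem_pyRange_one]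
    rw [List.getElem_map]
    rw [List.getElem_range'_1]
    push_cast
    omega

theorem map_range_drop_take {α : Type} (f : Nat → α) (N l c : Nat) (h : l + c ≤ N) :
    (((List.range N).map f).drop l).take c = (List.range' l c).map f := by
  apply List.ext_getElem
  · simp; omega
  · intro i h1 h2
    simp [List.getElem_take, List.getElem_drop, List.getElem_range, List.getElem_range']

theorem foldl_dup {β α : Type} (g : β → α → β) (L : List α) (x : β) :
    L.foldl (fun st i => (g st.1 i, g st.2 i)) (x, x) = (L.foldl g x, L.foldl g x) := by
  induction L generalizing x with
  | nil => rfl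
  | cons a L ih =>
    simp only [List.foldl_cons]
    exact ih (g x a)

theorem getD_set_self {α : Type} (l : List α) (i : Nat) (v e : α) (h : i < l.length) :
    (l.set i v).getD i e = v := by
  simp [List.getD_eq_getElem?_getD, h]

theorem getD_set_ne {α : Type} (l : List α) (i j : Nat) (v e : α) (h : j ≠ i) :
    (l.set i v).getD j e = l.getD j e := by
  simp [List.getD_eq_getElem?_getD, List.getElem?_set_ne (by omega : i ≠ j)]

theorem pvEntry_set2_self (mm : List (List Int)) (m j : Nat) (v : Int)
    (hm : m < mm.length) (hj : j < (mm.getD m []).length) :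
    pvEntry (pvSet2 mm m j v) m j = v := by
  unfold pvEntry pvSet2
  rw [getD_set_self _ _ _ _ hm]
  rw [getD_set_self _ _ _ _ hj]

theorem pvEntry_set2_ne (mm : List (List Int)) (m j m' j' : Nat) (v : Int)
    (h : m' ≠ m ∨ j' ≠ j) :
    pvEntry (pvSet2 mm m j v) m' j' = pvEntry mm m' j' := by
  unfold pvEntry pvSet2
  rcases h with h | h
  · rw [getD_set_ne _ _ _ _ _ h]
  · by_cases hm : m' = m
    · subst hm
      by_cases hlen : m' < mm.length
      · rw [getD_set_self _ _ _ _ hlen, getD_set_ne _ _ _ _ _ h]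
      · have hset : ∀ (w : List Int), (mm.set m' w)[m']? = none :=
          fun w => List.getElem?_eq_none (by simp; omega)
        have h2 : mm[m']? = none := List.getElem?_eq_none (by omega)
        simp [List.getD_eq_getElem?_getD, hset, h2]
    · rw [getD_set_ne _ _ _ _ _ hm]

theorem pvInv_set2 (s : List Int) (d : Int) (R K : Nat) (mm mM : List (List Int))
    (hInv : pvInv s d R K mm mM) (m j : Nat) (hm : m ≤ R) (hj : j ≤ K) (hj0 : j ≠ 0) :
    pvInv s d R K (pvSet2 mm m j (pvG s d m j).1) (pvSet2 mM m j (pvG s d m j).2) := by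
  obtain ⟨h1, h2, h3, h4, h5⟩ := hInv
  have hmlen : m < mm.length := by omega
  have hmlen' : m < mM.length := by omega
  have hrow : (mm.getD m []).length = K + 1 := by
    rw [List.getD_eq_getElem mm [] hmlen]
    exact h3 _ (List.getElem_mem hmlen)
  have hrow' : (mM.getD m []).length = K + 1 := by
    rw [List.getD_eq_getElem mM [] hmlen']
    exact h4 _ (List.getElem_mem hmlen')
  refine ⟨by simpa [pvSet2] using h1, by simpa [pvSet2] using h2, ?_, ?_, ?_⟩
  · intro r hr
    rcases List.mem_or_eq_of_mem_set hr with hr | hr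
    · exact h3 r hr
    · rw [hr]; simpa using hrow
  · intro r hr
    rcases List.mem_or_eq_of_mem_set hr with hr | hr
    · exact h4 r hr
    · rw [hr]; simpa using hrow'
  · intro m' j' hm' hj'
    by_cases hmj : m' = m ∧ j' = j
    · obtain ⟨hm1, hj1⟩ := hmj
      subst hm1; subst hj1
      rw [pvEntry_set2_self _ _ _ _ hmlen (by omega),
          pvEntry_set2_self _ _ _ _ hmlen' (by omega)]
      exact ⟨fun h0 => absurd h0 hj0, fun _ => ⟨rfl, rfl⟩⟩
    · have hne : m' ≠ m ∨ j' ≠ j := by tauto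
      rw [pvEntry_set2_ne _ _ _ _ _ _ hne, pvEntry_set2_ne _ _ _ _ _ _ hne]
      exact h5 m' j' hm' hj'

-- the fold in solve's loop: state threading returns the pure paired fold, preserving pvInv
theorem foldA (s : List Int) (d : Int) (R K fuel' : Nat) (k : Int)
    (hrec : ∀ (n : Int) (mm mM : List (List Int)), pvInv s d R K mm mM → 0 ≤ n →
      n < (s.length : Int) → n.toNat ≤ R →
      (solveA s d fuel' n (k - 1) mm mM).1 = pvG s d n.toNat (k - 1).toNat ∧
      pvInv s d R K (solveA s d fuel' n (k - 1) mm mM).2.1 (solveA s d fuel' n (k - 1) mm mM).2.2) :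
    ∀ (L : List Int), (∀ i ∈ L, 0 ≤ i ∧ i < (s.length : Int) ∧ i.toNat ≤ R) →
    ∀ (c : Int × Int) (mm mM : List (List Int)), pvInv s d R K mm mM →
      (L.foldl
        (fun (st : (Int × Int) × List (List Int) × List (List Int)) i =>
          let r := solveA s d fuel' i (k - 1) st.2.1 st.2.2
          let x := PySem.List.pyGetD s i 0
          ((min st.1.1 (min (r.1.1 * x) (r.1.2 * x)),
            max st.1.2 (max (r.1.1 * x) (r.1.2 * x))), r.2))
        (c, mm, mM)).1
        = L.foldl (fun c i =>
            (min c.1 (pvLoV s d (k - 1).toNat i.toNat),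
             max c.2 (pvHiV s d (k - 1).toNat i.toNat))) c ∧
      pvInv s d R K
        (L.foldl
          (fun (st : (Int × Int) × List (List Int) × List (List Int)) i =>
            let r := solveA s d fuel' i (k - 1) st.2.1 st.2.2
            let x := PySem.List.pyGetD s i 0
            ((min st.1.1 (min (r.1.1 * x) (r.1.2 * x)),
              max st.1.2 (max (r.1.1 * x) (r.1.2 * x))), r.2))
          (c, mm, mM)).2.1
        (L.foldl
          (fun (st : (Int × Int) × List (List Int) × List (List Int)) i =>
            let r := solveA s d fuel' i (k - 1) st.2.1 st.2.2
            let x := PySem.List.pyGetD s i 0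
            ((min st.1.1 (min (r.1.1 * x) (r.1.2 * x)),
              max st.1.2 (max (r.1.1 * x) (r.1.2 * x))), r.2))
          (c, mm, mM)).2.2 := by
  intro L
  induction L with
  | nil =>
    intro _ c mm mM hInv
    exact ⟨rfl, hInv⟩
  | cons i L ihL =>
    intro hmem c mm mM hInv
    obtain ⟨hi0, hilen, hiR⟩ := hmem i (List.mem_cons_self)
    obtain ⟨hv, hInv'⟩ := hrec i mm mM hInv hi0 hilen hiR
    have hx : PySem.List.pyGetD s i 0 = s.getD i.toNat 0 := by
      rw [PySem.List.pyGetD_eq_getElem s 0 hi0 hilen]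
      rw [List.getD_eq_getElem s 0 (by omega)]
    simp only [List.foldl_cons]
    rw [hx, hv]
    simp only [pvLoV, pvHiV]
    exact ihL (fun t ht => hmem t (List.mem_cons_of_mem i ht)) _ _ _ hInv'

theorem solveA_correct (s : List Int) (d : Int) (R K : Nat) :
    ∀ (fuel : Nat) (n k : Int) (mm mM : List (List Int)),
      pvInv s d R K mm mM → 0 ≤ n → n < (s.length : Int) → n.toNat ≤ R → 0 ≤ k →
      k.toNat ≤ K → k.toNat ≤ fuel →
      (solveA s d fuel n k mm mM).1 = pvG s d n.toNat k.toNat ∧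
      pvInv s d R K (solveA s d fuel n k mm mM).2.1 (solveA s d fuel n k mm mM).2.2 := by
  intro fuel
  induction fuel with
  | zero =>
    intro n k mm mM hInv hn0 hn hnR hk0 hkK hfl
    obtain ⟨h1, h2, h3, h4, h5⟩ := hInv
    have hk : k.toNat = 0 := by omega
    have hb := (h5 n.toNat k.toNat (by omega) (by omega)).1 hk
    simp only [pvEntry] at hb
    rw [solveA]
    simp only [hb.1]
    rw [if_pos (by norm_num)]
    rw [hb.2, hk, pvG]
    exact ⟨rfl, h1, h2, h3, h4, h5⟩
  | succ fuel' ih =>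
    intro n k mm mM hInv hn0 hn hnR hk0 hkK hfl
    by_cases ha : 0 < pvEntry mm n.toNat k.toNat
    · obtain ⟨h1, h2, h3, h4, h5⟩ := hInv
      obtain ⟨he1, he2⟩ := (h5 n.toNat k.toNat (by omega) (by omega)).2 ha
      rw [solveA]
      simp only [pvEntry] at ha he1 he2
      rw [if_pos ha, he1, he2]
      exact ⟨rfl, h1, h2, h3, h4, h5⟩
    · have hk1 : k.toNat ≠ 0 := by
        intro h0
        obtain ⟨h1, h2, h3, h4, h5⟩ := hInv
        have hb := (h5 n.toNat k.toNat (by omega) (by omega)).1 h0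
        rw [hb.1] at ha
        exact ha (by norm_num)
      have hne : ¬((s.length : Int) = n) := by omega
      have hleft0 : 0 ≤ max (k - 1) (n - d) := le_trans (by omega) (le_max_left _ _)
      have hrec : ∀ (n' : Int) (mm' mM' : List (List Int)), pvInv s d R K mm' mM' → 0 ≤ n' →
          n' < (s.length : Int) → n'.toNat ≤ R →
          (solveA s d fuel' n' (k - 1) mm' mM').1 = pvG s d n'.toNat (k - 1).toNat ∧
          pvInv s d R K (solveA s d fuel' n' (k - 1) mm' mM').2.1
            (solveA s d fuel' n' (k - 1) mm' mM').2.2 :=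
        fun n' mm' mM' hI h0' h1' hR' =>
          ih n' (k - 1) mm' mM' hI h0' h1' hR' (by omega) (by omega) (by omega)
      have hmem : ∀ i ∈ PySem.List.pyRange (max (k - 1) (n - d)) n 1,
          0 ≤ i ∧ i < (s.length : Int) ∧ i.toNat ≤ R := by
        intro i hi
        rw [PySem.List.mem_pyRange_one] at hi
        refine ⟨by omega, by omega, by omega⟩
      obtain ⟨hval, hInv'⟩ :=
        foldA s d R K fuel' k hrec (PySem.List.pyRange (max (k - 1) (n - d)) n 1) hmem
          (999999999, -1) mm mM hInv
      -- the pure paired fold equals pvG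
      have hfold :
          (PySem.List.pyRange (max (k - 1) (n - d)) n 1).foldl
            (fun c i => (min c.1 (pvLoV s d (k - 1).toNat i.toNat),
                         max c.2 (pvHiV s d (k - 1).toNat i.toNat))) (999999999, -1)
          = pvG s d n.toNat k.toNat := by
        obtain ⟨t, ht⟩ := Nat.exists_eq_succ_of_ne_zero hk1
        rw [pyRange_nonneg_eq_map _ _ hleft0, List.foldl_map, ht, pvG]
        have e1 : k - 1 = (t : Int) := by omega
        have e2 : ((n.toNat : Nat) : Int) = n := by omega
        have e3 : max (k - 1) (n - d) = max (t : Int) ((n.toNat : Int) - d) := by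
          rw [e1, e2]
        rw [e3, e1]
        simp only [Int.toNat_natCast, pvLoV, pvHiV]
      rw [solveA]
      simp only [pvEntry] at ha
      rw [if_neg ha, if_neg hne]
      refine ⟨?_, ?_⟩
      · simp only []
        rw [hval, hfold]
      · simp only []
        rw [hval, hfold]
        have hres := pvInv_set2 s d R K _ _ hInv' n.toNat k.toNat (by omega) (by omega) hk1
        exact hres

-- initial matrices: column 0 holds 1, everything else 0
theorem init_char (N C : Nat) (t : Nat) (ht : t ≤ N + 1) :
    let M := (List.range t).foldl (fun mm (i : Nat) => pvSet2 mm i 0 1)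
      (List.replicate (N + 1) (List.replicate (C + 1) (0 : Int)))
    M.length = N + 1 ∧ (∀ r ∈ M, r.length = C + 1) ∧
      ∀ m j, pvEntry M m j = if m < t ∧ j = 0 then 1 else 0 := by
  induction t with
  | zero =>
    refine ⟨by simp, by intro r hr; simp_all [List.eq_of_mem_replicate hr], ?_⟩
    intro m j
    simp only [List.range_zero, List.foldl_nil]
    unfold pvEntry
    simp [List.getD_eq_getElem?_getD, List.getElem?_replicate]
    split <;> simp
  | succ t iht =>
    obtain ⟨ih1, ih2, ih3⟩ := iht (by omega)
    rw [List.range_succ, List.foldl_append, List.foldl_cons, List.foldl_nil]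
    set M := (List.range t).foldl (fun mm (i : Nat) => pvSet2 mm i 0 1)
      (List.replicate (N + 1) (List.replicate (C + 1) (0 : Int))) with hM
    have htlen : t < M.length := by omega
    have hrowt : (M.getD t []).length = C + 1 := by
      rw [List.getD_eq_getElem M [] htlen]
      exact ih2 _ (List.getElem_mem htlen)
    refine ⟨by simpa [pvSet2] using ih1, ?_, ?_⟩
    · intro r hr
      rcases List.mem_or_eq_of_mem_set hr with hr | hr
      · exact ih2 r hr
      · rw [hr]; simpa using hrowt
    · intro m j
      by_cases hmj : m = t ∧ j = 0
      · obtain ⟨hm1, hj1⟩ := hmj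
        subst hm1; subst hj1
        rw [pvEntry_set2_self _ _ _ _ htlen (by omega)]
        simp
      · have hne : m ≠ t ∨ j ≠ 0 := by tauto
        rw [pvEntry_set2_ne _ _ _ _ _ _ hne, ih3 m j]
        rcases hne with hne | hne
        · by_cases hj : j = 0 <;> by_cases hm : m < t <;> simp_all <;> omega
        · simp [hne]

-- ----- B side -----
def pvRow (s : List Int) (d : Int) (N j : Nat) : List (Int × Int) :=
  (List.range N).map (fun m => pvG s d m j)

theorem pvLo_row (s : List Int) (d : Int) (N : Nat) (hN : N ≤ s.length) (j : Nat) :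
    pvLo (pvRow s d N j) s = (List.range N).map (pvLoV s d j) := by
  unfold pvLo pvRow
  apply List.ext_getElem
  · simp
    omega
  · intro i h1 h2
    simp only [List.getElem_zipWith, List.getElem_map, List.getElem_range]
    unfold pvLoV
    have hi : i < N := by simpa using h2
    rw [List.getD_eq_getElem s 0 (by omega)]

theorem pvHi_row (s : List Int) (d : Int) (N : Nat) (hN : N ≤ s.length) (j : Nat) :
    pvHi (pvRow s d N j) s = (List.range N).map (pvHiV s d j) := by
  unfold pvHi pvRow
  apply List.ext_getElem
  · simp
    omega
  · intro i h1 h2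
    simp only [List.getElem_zipWith, List.getElem_map, List.getElem_range]
    unfold pvHiV
    have hi : i < N := by simpa using h2
    rw [List.getD_eq_getElem s 0 (by omega)]

theorem stepB (s : List Int) (d : Int) (N : Nat) (hN : N ≤ s.length) (j : Nat) :
    pvAltStep s (N : Int) d (pvRow s d N j) ((j : Int) + 1) = pvRow s d N (j + 1) := by
  unfold pvAltStep
  rw [pvLo_row s d N hN, pvHi_row s d N hN]
  rw [pyRange_nonneg_eq_map 0 (N : Int) le_rfl]
  simp only [Int.toNat_zero, Nat.sub_zero, Int.toNat_natCast, ← List.range_eq_range',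
    List.map_map]
  unfold pvRow
  apply List.map_congr_left
  intro m hm
  have hmN : m < N := List.mem_range.mp hm
  simp only [Function.comp]
  have hj1 : ((j : Int) + 1 - 1) = (j : Int) := by ring
  rw [hj1]
  have ha0 : 0 ≤ max (j : Int) ((m : Int) - d) := le_trans (by positivity) (le_max_left _ _)
  rw [PySem.List.slice_toNat _ ha0 (by positivity), PySem.List.slice_toNat _ ha0 (by positivity)]
  rw [pvG_succ]
  set l := (max (j : Int) ((m : Int) - d)).toNat with hl
  have hmt : (m : Int).toNat = m := Int.toNat_natCast m
  rw [hmt]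
  by_cases hlm : l ≤ m
  · rw [map_range_drop_take _ N l (m - l) (by omega),
        map_range_drop_take _ N l (m - l) (by omega)]
    rw [List.foldl_map, List.foldl_map]
  · have hml : m - l = 0 := by omega
    rw [hml]
    simp

theorem rowB (s : List Int) (d : Int) (N : Nat) (hN : N ≤ s.length) (t : Nat) :
    (PySem.List.pyRange 1 ((t : Int) + 1) 1).foldl (pvAltStep s (N : Int) d)
      (List.replicate N ((1 : Int), (1 : Int))) = pvRow s d N t := by
  induction t with
  | zero =>
    rw [PySem.List.pyRange_one_eq_nil (by norm_num)]
    rw [List.foldl_nil]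
    apply List.ext_getElem
    · simp [pvRow]
    · intro i h1 h2
      simp only [pvRow, List.getElem_replicate, List.getElem_map, List.getElem_range]
      rw [pvG]
  | succ t iht =>
    have hcast : (((t + 1 : Nat) : Int) + 1) = ((t : Int) + 1) + 1 := by push_cast; ring
    rw [hcast, PySem.List.pyRange_one_succ_right (by omega), List.foldl_append,
        List.foldl_cons, List.foldl_nil, iht]
    exact stepB s d N hN t

-- ===== VERDICT (by name: the statement is the Claim_ definition above) =====
theorem book_recursion_spec : Claim_equal_book_recursion := by
  intro s n k d hDom hPre
  obtain ⟨hn0, hk0, hcase⟩ := hPre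
  unfold Spec_book_recursion
  -- initial matrices
  have h1 : (n + 1).toNat = n.toNat + 1 := by omega
  have h2 : (k + 1).toNat = k.toNat + 1 := by omega
  obtain ⟨hM1, hM2, hM3⟩ := init_char n.toNat k.toNat (n.toNat + 1) le_rfl
  set M := (List.range (n.toNat + 1)).foldl (fun mm (i : Nat) => pvSet2 mm i 0 1)
    (List.replicate (n.toNat + 1) (List.replicate (k.toNat + 1) (0 : Int))) with hMdef
  have hinit : (PySem.List.pyRange 0 (n + 1) 1).foldl pvInitStep
      (List.replicate (n + 1).toNat (List.replicate (k + 1).toNat (0 : Int)),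
       List.replicate (n + 1).toNat (List.replicate (k + 1).toNat (0 : Int)))
      = (M, M) := by
    rw [pyRange_nonneg_eq_map 0 _ le_rfl, List.foldl_map]
    simp only [Int.toNat_zero, Nat.sub_zero, ← List.range_eq_range', h1, h2]
    simp only [pvInitStep, Int.toNat_natCast]
    exact foldl_dup (fun m (i : Nat) => pvSet2 m i 0 1) _ _
  have hInv : pvInv s d n.toNat k.toNat M M := by
    refine ⟨hM1, hM1, hM2, hM2, ?_⟩
    intro m j hm hj
    constructor
    · intro hj0
      subst hj0
      rw [hM3 m 0, if_pos ⟨by omega, rfl⟩]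
      exact ⟨rfl, rfl⟩
    · intro hpos
      rw [hM3 m j] at hpos ⊢
      by_cases hc : m < n.toNat + 1 ∧ j = 0
      · rw [if_pos hc]
        obtain ⟨-, hj0⟩ := hc
        subst hj0
        rw [pvG]
        exact ⟨rfl, rfl⟩
      · rw [if_neg hc] at hpos
        exact absurd hpos (by norm_num)
  have hent0 : ∀ j : Nat, j ≤ k.toNat →
      (M.getD n.toNat []).getD j 0 = if j = 0 then 1 else 0 := by
    intro j hj
    have := hM3 n.toNat j
    simp only [pvEntry] at this
    rw [this]
    by_cases hj0 : j = 0 <;> simp [hj0]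
  by_cases hk : k = 0
  · subst hk
    simp only [book_recursion, book_recursion_alt]
    rw [hinit, solveA.eq_def]
    have ha : ((M.getD n.toNat []).getD 0 0) = 1 := by
      simpa using hent0 0 (by omega)
    simp only [Int.toNat_zero, ha]
    rw [if_pos (by norm_num)]
    simp
  · -- k ≥ 1
    obtain ⟨t, ht⟩ := Nat.exists_eq_succ_of_ne_zero (by omega : k.toNat ≠ 0)
    simp only [book_recursion, book_recursion_alt, if_neg hk]
    rw [hinit, solveA.eq_def]
    have ha : ((M.getD n.toNat []).getD k.toNat 0) = 0 := by
      have := hent0 k.toNat le_rfl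
      simpa [ht] using this
    simp only [ha]
    rw [if_neg (by norm_num), ht]
    simp only []
    set lft := if (s.length : Int) = n then k - 1 else max (k - 1) (n - d) with hlft
    have hlft1 : k - 1 ≤ lft := by
      rw [hlft]
      split
      · exact le_refl _
      · exact le_max_left _ _
    have hlft0 : 0 ≤ lft := by omega
    by_cases hemp : n ≤ lft
    · rw [if_pos hemp, PySem.List.pyRange_one_eq_nil hemp, List.foldl_nil]
    · rw [if_neg hemp]
      have hnlen : n ≤ (s.length : Int) := by
        by_contra hgt
        have hlfteq : lft = max (k - 1) (n - d) := by
          rw [hlft, if_neg (by omega)]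
        have hb1 : k - 1 ≤ max (k - 1) (n - d) := le_max_left _ _
        have hb2 : n - d ≤ max (k - 1) (n - d) := le_max_right _ _
        rcases hcase with h | h | h | h
        · omega
        · omega
        · omega
        · omega
      have hkn : k ≤ n := by omega
      have hrec : ∀ (n' : Int) (mm' mM' : List (List Int)), pvInv s d n.toNat k.toNat mm' mM' →
          0 ≤ n' → n' < (s.length : Int) → n'.toNat ≤ n.toNat →
          (solveA s d t n' (k - 1) mm' mM').1 = pvG s d n'.toNat (k - 1).toNat ∧
          pvInv s d n.toNat k.toNat (solveA s d t n' (k - 1) mm' mM').2.1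
            (solveA s d t n' (k - 1) mm' mM').2.2 :=
        fun n' mm' mM' hI h0' h1' hR' =>
          solveA_correct s d n.toNat k.toNat t n' (k - 1) mm' mM' hI h0' h1' hR' (by omega)
            (by omega) (by omega)
      have hmem : ∀ i ∈ PySem.List.pyRange lft n 1,
          0 ≤ i ∧ i < (s.length : Int) ∧ i.toNat ≤ n.toNat := by
        intro i hi
        rw [PySem.List.mem_pyRange_one] at hi
        exact ⟨by omega, by omega, by omega⟩
      obtain ⟨hval, -⟩ := foldA s d n.toNat k.toNat t k hrec
        (PySem.List.pyRange lft n 1) hmem (999999999, -1) M M hInv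
      have hval2 : (List.foldl
          (fun (st : (Int × Int) × List (List Int) × List (List Int)) (i : Int) =>
            ((min st.1.1
                (min ((solveA s d t i (k - 1) st.2.1 st.2.2).1.1 * PySem.List.pyGetD s i 0)
                  ((solveA s d t i (k - 1) st.2.1 st.2.2).1.2 * PySem.List.pyGetD s i 0)),
              max st.1.2
                (max ((solveA s d t i (k - 1) st.2.1 st.2.2).1.1 * PySem.List.pyGetD s i 0)
                  ((solveA s d t i (k - 1) st.2.1 st.2.2).1.2 * PySem.List.pyGetD s i 0))),
             (solveA s d t i (k - 1) st.2.1 st.2.2).2))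
          ((999999999, -1), M, M) (PySem.List.pyRange lft n 1)).1
          = (PySem.List.pyRange lft n 1).foldl
              (fun c i => (min c.1 (pvLoV s d (k - 1).toNat i.toNat),
                           max c.2 (pvHiV s d (k - 1).toNat i.toNat))) (999999999, -1) := hval
      rw [hval2]
      have e1 : (k - 1).toNat = t := by omega
      have hsplit : (PySem.List.pyRange lft n 1).foldl
          (fun c i => (min c.1 (pvLoV s d (k - 1).toNat i.toNat),
                       max c.2 (pvHiV s d (k - 1).toNat i.toNat))) (999999999, -1)
          = ((List.range' lft.toNat (n.toNat - lft.toNat)).foldl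
               (fun c i => min c (pvLoV s d t i)) 999999999,
             (List.range' lft.toNat (n.toNat - lft.toNat)).foldl
               (fun c i => max c (pvHiV s d t i)) (-1)) := by
        rw [pyRange_nonneg_eq_map _ _ hlft0, List.foldl_map]
        simp only [e1, Int.toNat_natCast]
        exact foldl_pair_split (pvLoV s d t) (pvHiV s d t) _ _ _
      rw [hsplit]
      -- B side
      have hkc : k = (t : Int) + 1 := by omega
      have hncast : ((n.toNat : Nat) : Int) = n := by omega
      have hrowB := rowB s d n.toNat (by omega) t
      rw [hncast] at hrowB
      rw [hkc, hrowB]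
      rw [pvLo_row s d n.toNat (by omega), pvHi_row s d n.toNat (by omega)]
      have hs1 : PySem.List.slice ((List.range n.toNat).map (pvLoV s d t)) (some lft) (some n)
          = (List.range' lft.toNat (n.toNat - lft.toNat)).map (pvLoV s d t) := by
        rw [PySem.List.slice_toNat _ hlft0 (by omega)]
        exact map_range_drop_take _ _ _ _ (by omega)
      have hs2 : PySem.List.slice ((List.range n.toNat).map (pvHiV s d t)) (some lft) (some n)
          = (List.range' lft.toNat (n.toNat - lft.toNat)).map (pvHiV s d t) := by
        rw [PySem.List.slice_toNat _ hlft0 (by omega)]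
        exact map_range_drop_take _ _ _ _ (by omega)
      rw [hs1, hs2, List.foldl_map, List.foldl_map]
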